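-- pv_equiv track=rewrite | github.com/chubbyk-uu/gomoku-test | src/gomoku/ai/vcf.py | _prioritize_attack_moves
-- ===== SOURCE A (Python) =====
-- Move = tuple[int, int]
--
-- def _prioritize_attack_moves(
--     moves: list[Move],
--     probes: list[tuple[bool, bool, bool, int]],
-- ) -> list[Move]:
--     prioritized: list[tuple[int, int, int, int]] = []
--     for index, (row_col, (is_win, is_open_four, has_potential, score)) in enumerate(
--         zip(moves, probes, strict=False)
--     ):
--         if is_win:
--             priority = 5
--         elif is_open_four:
--             priority = 4
--         elif has_potential and int(score) >= 2_000:
--             priority = 1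
--         else:
--             continue
--         prioritized.append((priority, int(score), -index, index))
--
--     prioritized.sort(reverse=True)
--     return [moves[index] for _, _, _, index in prioritized]
-- ===== SOURCE B (Python) =====
-- Move = tuple[int, int]
--
-- def _prioritize_attack_moves(
--     moves: list[Move],
--     probes: list[tuple[bool, bool, bool, int]],
-- ) -> list[Move]:
--     # Partition candidates into three priority buckets in one pass,
--     # then emit each bucket sorted by score desc / index asc.
--     wins: list[tuple[int, int]] = []
--     fours: list[tuple[int, int]] = []
--     pots: list[tuple[int, int]] = []
--     for index, (_move, (is_win, is_open_four, has_potential, score)) in enumerate(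
--         zip(moves, probes)
--     ):
--         s = int(score)
--         if is_win:
--             wins.append((s, index))
--         elif is_open_four:
--             fours.append((s, index))
--         elif has_potential and s >= 2_000:
--             pots.append((s, index))
--     return [
--         moves[i]
--         for bucket in (wins, fours, pots)
--         for _s, i in sorted(bucket, key=lambda t: (-t[0], t[1]))
--     ]
-- ===== Notes on version B (the rewrite author's own statement) =====
-- stated objective: alternative
-- what changed: Replaces A's single global reverse sort of composite (priority, score, -index, index) keys by a one-pass partition into three priority buckets (win / open-four / potential>=2000) that are each sorted by (-score, index) and emitted in fixed priority order.
import Mathlib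
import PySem

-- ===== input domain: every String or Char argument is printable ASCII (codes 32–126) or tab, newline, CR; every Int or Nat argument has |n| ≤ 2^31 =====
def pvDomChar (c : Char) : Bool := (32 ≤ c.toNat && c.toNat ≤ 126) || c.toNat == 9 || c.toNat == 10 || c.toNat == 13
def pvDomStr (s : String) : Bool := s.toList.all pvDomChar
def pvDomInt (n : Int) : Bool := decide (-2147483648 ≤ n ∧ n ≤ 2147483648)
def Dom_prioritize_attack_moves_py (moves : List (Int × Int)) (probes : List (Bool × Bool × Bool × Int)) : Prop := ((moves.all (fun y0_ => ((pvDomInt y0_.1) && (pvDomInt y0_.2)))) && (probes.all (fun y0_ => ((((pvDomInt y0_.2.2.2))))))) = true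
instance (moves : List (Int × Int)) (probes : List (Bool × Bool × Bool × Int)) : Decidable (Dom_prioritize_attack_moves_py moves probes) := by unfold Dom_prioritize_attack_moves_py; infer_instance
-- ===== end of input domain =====

-- B partitions the candidates into three priority buckets in one pass and sorts each bucket
-- separately (score desc, index asc), instead of A's single global reverse sort of composite
-- (priority, score, -index, index) keys; objective: alternative decomposition, same result.


-- ===== PORT A =====
-- literal port of A: build (priority, score, -index, index) records, sort them reverse=True
-- under Python's tuple (lexicographic) comparison (the Lex key below IS that comparison),
-- then read off moves[index].  moves[index] is ported as pyGetD: index is always a valid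
-- non-negative index of moves here, so pyGetD is exact (the default is never used).
def prioritize_attack_moves_py (moves : List (Int × Int)) (probes : List (Bool × Bool × Bool × Int)) : List (Int × Int) :=
  let prioritized : List (Int × Int × Int × Int) :=
    (PySem.List.enumerate (moves.zip probes)).foldl
      (fun acc e =>
        if e.2.2.1 then acc ++ [(5, e.2.2.2.2.2, -e.1, e.1)]
        else if e.2.2.2.1 then acc ++ [(4, e.2.2.2.2.2, -e.1, e.1)]
        else if e.2.2.2.2.1 && decide (e.2.2.2.2.2 ≥ 2000) then acc ++ [(1, e.2.2.2.2.2, -e.1, e.1)]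
        else acc) []
  (PySem.List.sorted prioritized
      (fun t => toLex (t.1, toLex (t.2.1, toLex (t.2.2.1, t.2.2.2)))) true).map
    (fun t => PySem.List.pyGetD moves t.2.2.2 (0, 0))

-- ===== PORT B =====
-- literal port of Source B: one pass filling three buckets of (score, index) records, then for
-- each bucket in priority order emit moves[i], the bucket sorted by key (-score, index).
def prioritize_attack_moves_py_alt (moves : List (Int × Int)) (probes : List (Bool × Bool × Bool × Int)) : List (Int × Int) :=
  let buckets :=
    (PySem.List.enumerate (moves.zip probes)).foldl
      (fun (acc : List (Int × Int) × List (Int × Int) × List (Int × Int)) e =>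
        if e.2.2.1 then (acc.1 ++ [(e.2.2.2.2.2, e.1)], acc.2.1, acc.2.2)
        else if e.2.2.2.1 then (acc.1, acc.2.1 ++ [(e.2.2.2.2.2, e.1)], acc.2.2)
        else if e.2.2.2.2.1 && decide (e.2.2.2.2.2 ≥ 2000) then (acc.1, acc.2.1, acc.2.2 ++ [(e.2.2.2.2.2, e.1)])
        else acc) ([], [], [])
  ([buckets.1, buckets.2.1, buckets.2.2].map
    (fun b => (PySem.List.sorted2 b (fun t => -t.1) (fun t => t.2)).map
      (fun t => PySem.List.pyGetD moves t.2 (0, 0)))).flatten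

-- ===== PRECONDITION & SPEC =====
def Spec_prioritize_attack_moves_py (moves : List (Int × Int)) (probes : List (Bool × Bool × Bool × Int)) (out : List (Int × Int)) : Prop := out = prioritize_attack_moves_py_alt moves probes
instance (moves : List (Int × Int)) (probes : List (Bool × Bool × Bool × Int)) (out : List (Int × Int)) : Decidable (Spec_prioritize_attack_moves_py moves probes out) := by unfold Spec_prioritize_attack_moves_py; infer_instance

-- ===== CLAIM (what is proved, stated in full; the proofs are below) =====
def Claim_equal_prioritize_attack_moves_py : Prop := ∀ (moves : List (Int × Int)) (probes : List (Bool × Bool × Bool × Int)), Dom_prioritize_attack_moves_py moves probes → Spec_prioritize_attack_moves_py moves probes (prioritize_attack_moves_py moves probes)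

-- ===== LEMMAS AND PROOFS =====

-- the three bucket selectors of B (as first-match filters) and A's record selector
def pvSelA (e : Int × (Int × Int) × (Bool × Bool × Bool × Int)) : Option (Int × Int × Int × Int) :=
  if e.2.2.1 then some (5, e.2.2.2.2.2, -e.1, e.1)
  else if e.2.2.2.1 then some (4, e.2.2.2.2.2, -e.1, e.1)
  else if e.2.2.2.2.1 && decide (e.2.2.2.2.2 ≥ 2000) then some (1, e.2.2.2.2.2, -e.1, e.1)
  else none

def pvSel5 (e : Int × (Int × Int) × (Bool × Bool × Bool × Int)) : Option (Int × Int) :=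
  if e.2.2.1 then some (e.2.2.2.2.2, e.1) else none
def pvSel4 (e : Int × (Int × Int) × (Bool × Bool × Bool × Int)) : Option (Int × Int) :=
  if e.2.2.1 then none else if e.2.2.2.1 then some (e.2.2.2.2.2, e.1) else none
def pvSel1 (e : Int × (Int × Int) × (Bool × Bool × Bool × Int)) : Option (Int × Int) :=
  if e.2.2.1 then none else if e.2.2.2.1 then none
  else if e.2.2.2.2.1 && decide (e.2.2.2.2.2 ≥ 2000) then some (e.2.2.2.2.2, e.1) else none

-- embed a bucket record (score, index) as A's record with priority p
def pvEmb (p : Int) (t : Int × Int) : Int × Int × Int × Int := (p, t.1, -t.2, t.2)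

def pvKey4 (t : Int × Int × Int × Int) : Lex (Int × Lex (Int × Lex (Int × Int))) :=
  toLex (t.1, toLex (t.2.1, toLex (t.2.2.1, t.2.2.2)))

-- A's accumulation loop is the filterMap of pvSelA
theorem pvFoldA (L : List (Int × (Int × Int) × (Bool × Bool × Bool × Int)))
    (acc : List (Int × Int × Int × Int)) :
    L.foldl
      (fun acc e =>
        if e.2.2.1 then acc ++ [(5, e.2.2.2.2.2, -e.1, e.1)]
        else if e.2.2.2.1 then acc ++ [(4, e.2.2.2.2.2, -e.1, e.1)]
        else if e.2.2.2.2.1 && decide (e.2.2.2.2.2 ≥ 2000) then acc ++ [(1, e.2.2.2.2.2, -e.1, e.1)]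
        else acc) acc = acc ++ L.filterMap pvSelA := by
  induction L generalizing acc with
  | nil => simp
  | cons e L ih =>
    rw [List.foldl_cons, ih, List.filterMap_cons]
    by_cases h1 : e.2.2.1 = true
    · simp [pvSelA, h1]
    · by_cases h2 : e.2.2.2.1 = true
      · simp [pvSelA, h1, h2]
      · by_cases h3 : (e.2.2.2.2.1 && decide (e.2.2.2.2.2 ≥ 2000)) = true
        · simp [pvSelA, h1, h2, h3]
        · simp [pvSelA, h1, h2, h3]

-- B's accumulation loop fills the three filterMap buckets
theorem pvFoldB (L : List (Int × (Int × Int) × (Bool × Bool × Bool × Int)))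
    (acc : List (Int × Int) × List (Int × Int) × List (Int × Int)) :
    L.foldl
      (fun (acc : List (Int × Int) × List (Int × Int) × List (Int × Int)) e =>
        if e.2.2.1 then (acc.1 ++ [(e.2.2.2.2.2, e.1)], acc.2.1, acc.2.2)
        else if e.2.2.2.1 then (acc.1, acc.2.1 ++ [(e.2.2.2.2.2, e.1)], acc.2.2)
        else if e.2.2.2.2.1 && decide (e.2.2.2.2.2 ≥ 2000) then (acc.1, acc.2.1, acc.2.2 ++ [(e.2.2.2.2.2, e.1)])
        else acc) acc
      = (acc.1 ++ L.filterMap pvSel5, acc.2.1 ++ L.filterMap pvSel4, acc.2.2 ++ L.filterMap pvSel1) := by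
  induction L generalizing acc with
  | nil => simp
  | cons e L ih =>
    rw [List.foldl_cons, ih]
    by_cases h1 : e.2.2.1 = true
    · simp [pvSel5, pvSel4, pvSel1, h1]
    · by_cases h2 : e.2.2.2.1 = true
      · simp [pvSel5, pvSel4, pvSel1, h1, h2]
      · by_cases h3 : (e.2.2.2.2.1 && decide (e.2.2.2.2.2 ≥ 2000)) = true
        · simp only [Bool.and_eq_true, decide_eq_true_eq, ge_iff_le] at h3
          simp [pvSel5, pvSel4, pvSel1, h1, h2, h3]
        · simp only [Bool.and_eq_true, decide_eq_true_eq, ge_iff_le] at h3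
          simp [pvSel5, pvSel4, pvSel1, h1, h2, h3]

-- A's records are a permutation of B's embedded buckets
theorem pvPerm (L : List (Int × (Int × Int) × (Bool × Bool × Bool × Int))) :
    (L.filterMap pvSelA).Perm
      ((L.filterMap pvSel5).map (pvEmb 5) ++ (L.filterMap pvSel4).map (pvEmb 4)
        ++ (L.filterMap pvSel1).map (pvEmb 1)) := by
  induction L with
  | nil => simp
  | cons e L ih =>
    by_cases h1 : e.2.2.1 = true
    · have hA : pvSelA e = some (5, e.2.2.2.2.2, -e.1, e.1) := by simp [pvSelA, h1]
      have h5 : pvSel5 e = some (e.2.2.2.2.2, e.1) := by simp [pvSel5, h1]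
      have h4 : pvSel4 e = none := by simp [pvSel4, h1]
      have hb1 : pvSel1 e = none := by simp [pvSel1, h1]
      simp only [List.filterMap_cons, hA, h5, h4, hb1, List.map_cons]
      simpa [pvEmb] using ih.cons (5, e.2.2.2.2.2, -e.1, e.1)
    · by_cases h2 : e.2.2.2.1 = true
      · have hA : pvSelA e = some (4, e.2.2.2.2.2, -e.1, e.1) := by simp [pvSelA, h1, h2]
        have h5 : pvSel5 e = none := by simp [pvSel5, h1]
        have h4 : pvSel4 e = some (e.2.2.2.2.2, e.1) := by simp [pvSel4, h1, h2]
        have hb1 : pvSel1 e = none := by simp [pvSel1, h1, h2]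
        simp only [List.filterMap_cons, hA, h5, h4, hb1, List.map_cons]
        refine (ih.cons (4, e.2.2.2.2.2, -e.1, e.1)).trans ?_
        have h := (List.perm_middle (a := pvEmb 4 (e.2.2.2.2.2, e.1))
          (l₁ := (L.filterMap pvSel5).map (pvEmb 5))
          (l₂ := (L.filterMap pvSel4).map (pvEmb 4) ++ (L.filterMap pvSel1).map (pvEmb 1))).symm
        simpa [pvEmb, List.append_assoc] using h
      · by_cases h3 : (e.2.2.2.2.1 && decide (e.2.2.2.2.2 ≥ 2000)) = true
        · have hA : pvSelA e = some (1, e.2.2.2.2.2, -e.1, e.1) := by simp [pvSelA, h1, h2, h3]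
          have h5 : pvSel5 e = none := by simp [pvSel5, h1]
          have h4 : pvSel4 e = none := by simp [pvSel4, h1, h2]
          have hb1 : pvSel1 e = some (e.2.2.2.2.2, e.1) := by simp [pvSel1, h1, h2, h3]
          simp only [List.filterMap_cons, hA, h5, h4, hb1, List.map_cons]
          refine (ih.cons (1, e.2.2.2.2.2, -e.1, e.1)).trans ?_
          have h := (List.perm_middle (a := pvEmb 1 (e.2.2.2.2.2, e.1))
            (l₁ := (L.filterMap pvSel5).map (pvEmb 5) ++ (L.filterMap pvSel4).map (pvEmb 4))
            (l₂ := (L.filterMap pvSel1).map (pvEmb 1))).symm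
          simpa [pvEmb, List.append_assoc] using h
        · have hA : pvSelA e = none := by simp [pvSelA, h1, h2, h3]
          have h5 : pvSel5 e = none := by simp [pvSel5, h1]
          have h4 : pvSel4 e = none := by simp [pvSel4, h1, h2]
          have hb1 : pvSel1 e = none := by simp [pvSel1, h1, h2, h3]
          simp only [List.filterMap_cons, hA, h5, h4, hb1]
          exact ih

-- B's two-key sort is the sort by the corresponding lexicographic key
theorem pvSorted2_eq (xs : List (Int × Int)) :
    PySem.List.sorted2 xs (fun t => -t.1) (fun t => t.2)
      = PySem.List.sorted xs (fun t => toLex ((-t.1 : Int), t.2)) := by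
  have hf : (fun (a b : Int × Int) => decide (-a.1 < -b.1) || !decide (-b.1 < -a.1) && decide (a.2 < b.2))
      = (fun (a b : Int × Int) => decide (toLex ((-a.1 : Int), a.2) < toLex ((-b.1 : Int), b.2))) := by
    funext a b
    by_cases h1 : (-a.1 : Int) < -b.1
    · simp [h1, Prod.Lex.lt_iff]
    · by_cases h2 : (-b.1 : Int) < -a.1
      · simp [h1, h2, Prod.Lex.lt_iff]; omega
      · by_cases h3 : a.2 < b.2
        · simp [h1, h2, h3, Prod.Lex.lt_iff]
          omega
        · simp [h1, h2, h3, Prod.Lex.lt_iff]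
  unfold PySem.List.sorted2 PySem.List.sorted
  dsimp only
  rw [hf]
  simp

-- a sorted bucket, embedded with priority p, is strictly decreasing under A's sort key
theorem pvBucketPairwise (L : List (Int × (Int × Int) × (Bool × Bool × Bool × Int)))
    (sel : (Int × (Int × Int) × (Bool × Bool × Bool × Int)) → Option (Int × Int))
    (hsel : ∀ e t, sel e = some t → t.2 = e.1)
    (hL : L.Pairwise (fun p q => p.1 < q.1)) (p : Int) :
    (((PySem.List.sorted2 (L.filterMap sel) (fun t => -t.1) (fun t => t.2)).map (pvEmb p)).Pairwise
      (fun a b => pvKey4 b < pvKey4 a)) := by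
  have hle : (PySem.List.sorted2 (L.filterMap sel) (fun t => -t.1) (fun t => t.2)).Pairwise
      (fun a b => toLex ((-a.1 : Int), a.2) ≤ toLex ((-b.1 : Int), b.2)) := by
    rw [pvSorted2_eq]
    exact PySem.List.sorted_pairwise (L.filterMap sel) _
  have hidx : (L.filterMap sel).Pairwise (fun a b => a.2 < b.2) := by
    refine List.pairwise_filterMap.mpr (hL.imp ?_)
    intro a b hab t ht t' ht'
    rw [hsel a t ht, hsel b t' ht']
    exact hab
  have hnd : (PySem.List.sorted2 (L.filterMap sel) (fun t => -t.1) (fun t => t.2)).Pairwise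
      (fun a b => a.2 ≠ b.2) := by
    have h1 : ((L.filterMap sel).map (·.2)).Pairwise (fun x y => x ≠ y) :=
      List.pairwise_map.mpr (hidx.imp (fun h => by omega))
    have hperm : ((PySem.List.sorted2 (L.filterMap sel) (fun t => -t.1) (fun t => t.2)).map (·.2)).Perm
        ((L.filterMap sel).map (·.2)) :=
      (PySem.List.sorted2_perm (L.filterMap sel) _ _ _).map _
    exact List.pairwise_map.mp (hperm.nodup_iff.mpr h1)
  refine List.pairwise_map.mpr ((hle.and hnd).imp ?_)
  rintro a b ⟨hab, hne⟩
  rw [Prod.Lex.le_iff] at hab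
  unfold pvKey4 pvEmb
  simp only [Prod.Lex.lt_iff, ofLex_toLex] at hab ⊢
  simp at hab ⊢
  omega

-- ===== VERDICT (by name: the statement is the Claim_ definition above) =====
set_option maxHeartbeats 2000000 in
theorem prioritize_attack_moves_py_spec : Claim_equal_prioritize_attack_moves_py := by
  intro moves probes _
  unfold Spec_prioritize_attack_moves_py prioritize_attack_moves_py prioritize_attack_moves_py_alt
  dsimp only
  rw [pvFoldA, pvFoldB]
  dsimp only
  simp only [List.nil_append]
  set L := PySem.List.enumerate (moves.zip probes) with hLdef
  have hL : L.Pairwise (fun p q => p.1 < q.1) := PySem.List.pairwise_lt_enumerate _ _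
  have hsel5 : ∀ e t, pvSel5 e = some t → t.2 = e.1 := by
    intro e t h; unfold pvSel5 at h; split_ifs at h <;>
      first
      | exact (congrArg Prod.snd (Option.some.inj h)).symm
      | simp at h
  have hsel4 : ∀ e t, pvSel4 e = some t → t.2 = e.1 := by
    intro e t h; unfold pvSel4 at h; split_ifs at h <;>
      first
      | exact (congrArg Prod.snd (Option.some.inj h)).symm
      | simp at h
  have hsel1 : ∀ e t, pvSel1 e = some t → t.2 = e.1 := by
    intro e t h; unfold pvSel1 at h; split_ifs at h <;>
      first
      | exact (congrArg Prod.snd (Option.some.inj h)).symm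
      | simp at h
  have h5 := pvBucketPairwise L pvSel5 hsel5 hL 5
  have h4 := pvBucketPairwise L pvSel4 hsel4 hL 4
  have h1 := pvBucketPairwise L pvSel1 hsel1 hL 1
  set S5 := PySem.List.sorted2 (L.filterMap pvSel5) (fun t => -t.1) (fun t => t.2) with hS5
  set S4 := PySem.List.sorted2 (L.filterMap pvSel4) (fun t => -t.1) (fun t => t.2) with hS4
  set S1 := PySem.List.sorted2 (L.filterMap pvSel1) (fun t => -t.1) (fun t => t.2) with hS1
  have hcross : ∀ (p q : Int), q < p → ∀ (x y : Int × Int), pvKey4 (pvEmb q y) < pvKey4 (pvEmb p x) := by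
    intro p q hqp x y
    unfold pvKey4 pvEmb
    simp [Prod.Lex.lt_iff]
    omega
  have hp : (S5.map (pvEmb 5) ++ S4.map (pvEmb 4) ++ S1.map (pvEmb 1)).Perm (L.filterMap pvSelA) := by
    refine List.Perm.trans ?_ (pvPerm L).symm
    exact (((PySem.List.sorted2_perm _ _ _ _).map (pvEmb 5)).append
      ((PySem.List.sorted2_perm _ _ _ _).map (pvEmb 4))).append
      ((PySem.List.sorted2_perm _ _ _ _).map (pvEmb 1))
  have hpair : (S5.map (pvEmb 5) ++ S4.map (pvEmb 4) ++ S1.map (pvEmb 1)).Pairwise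
      (fun a b => pvKey4 b < pvKey4 a) := by
    rw [List.pairwise_append, List.pairwise_append]
    refine ⟨⟨h5, h4, ?_⟩, h1, ?_⟩
    · intro a ha b hb
      obtain ⟨x, _, rfl⟩ := List.mem_map.mp ha
      obtain ⟨y, _, rfl⟩ := List.mem_map.mp hb
      exact hcross 5 4 (by norm_num) x y
    · intro a ha b hb
      obtain ⟨y, _, rfl⟩ := List.mem_map.mp hb
      rcases List.mem_append.mp ha with h | h
      · obtain ⟨x, _, rfl⟩ := List.mem_map.mp h
        exact hcross 5 1 (by norm_num) x y
      · obtain ⟨x, _, rfl⟩ := List.mem_map.mp h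
        exact hcross 4 1 (by norm_num) x y
  have hsorted := PySem.List.sorted_rev_eq_of_perm_of_pairwise_gt (L.filterMap pvSelA)
    (S5.map (pvEmb 5) ++ S4.map (pvEmb 4) ++ S1.map (pvEmb 1))
    (fun t => toLex (t.1, toLex (t.2.1, toLex (t.2.2.1, t.2.2.2)))) hp hpair
  rw [hsorted]
  simp [List.map_append, List.map_map, Function.comp_def, pvEmb, hS5, hS4, hS1]
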